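-- pv_equiv track=rewrite | github.com/huggingface/diffusers | src/diffusers/modular_pipelines/components_manager.py | summarize_dict_by_value_and_parts
-- ===== SOURCE A (Python) =====
-- from typing import Any, Dict, List, Optional, Union
--
-- def summarize_dict_by_value_and_parts(d: Dict[str, Any]) -> Dict[str, Any]:
--     """Summarizes a dictionary by finding common prefixes that share the same value.
--
--     For a dictionary with dot-separated keys like: {
--         'down_blocks.1.attentions.1.transformer_blocks.0.attn2.processor': [0.6],
--         'down_blocks.1.attentions.1.transformer_blocks.1.attn2.processor': [0.6],
--         'up_blocks.1.attentions.0.transformer_blocks.0.attn2.processor': [0.3],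
--     }
--
--     Returns a dictionary where keys are the shortest common prefixes and values are their shared values: {
--         'down_blocks': [0.6], 'up_blocks': [0.3]
--     }
--     """
--     # First group by values - convert lists to tuples to make them hashable
--     value_to_keys = {}
--     for key, value in d.items():
--         value_tuple = tuple(value) if isinstance(value, list) else value
--         if value_tuple not in value_to_keys:
--             value_to_keys[value_tuple] = []
--         value_to_keys[value_tuple].append(key)
--
--     def find_common_prefix(keys: List[str]) -> str:
--         """Find the shortest common prefix among a list of dot-separated keys."""
--         if not keys:
--             return ""
--         if len(keys) == 1:
--             return keys[0]
--
--         # Split all keys into parts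
--         key_parts = [k.split(".") for k in keys]
--
--         # Find how many initial parts are common
--         common_length = 0
--         for parts in zip(*key_parts):
--             if len(set(parts)) == 1:  # All parts at this position are the same
--                 common_length += 1
--             else:
--                 break
--
--         if common_length == 0:
--             return ""
--
--         # Return the common prefix
--         return ".".join(key_parts[0][:common_length])
--
--     # Create summary by finding common prefixes for each value group
--     summary = {}
--     for value_tuple, keys in value_to_keys.items():
--         prefix = find_common_prefix(keys)
--         if prefix:  # Only add if we found a common prefix
--             # Convert tuple back to list if it was originally a list
--             value = list(value_tuple) if isinstance(d[keys[0]], list) else value_tuple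
--             summary[prefix] = value
--         else:
--             summary[""] = value  # Use empty string if no common prefix
--
--     return summary
-- ===== SOURCE B (Python) =====
-- def _lcp(a, b):
--     out = []
--     for x, y in zip(a, b):
--         if x != y:
--             break
--         out.append(x)
--     return out
--
--
-- def summarize_dict_by_value_and_parts(d):
--     groups = {}
--     for key, value in d.items():
--         vt = tuple(value) if isinstance(value, list) else value
--         groups.setdefault(vt, []).append(key)
--
--     summary = {}
--     for vt, keys in groups.items():
--         if len(keys) == 1:
--             prefix = keys[0]
--         else:
--             parts = keys[0].split(".")
--             for k in keys[1:]:
--                 parts = _lcp(parts, k.split("."))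
--             prefix = ".".join(parts)
--         if prefix:
--             value = list(vt) if isinstance(d[keys[0]], list) else vt
--             summary[prefix] = value
--         else:
--             summary[""] = value
--     return summary
-- ===== Notes on version B (the rewrite author's own statement) =====
-- stated objective: alternative
-- what changed: The per-group common-prefix search is rewritten from a columnar zip-transpose scan (materialise all columns, count leading all-equal columns via set size) to a left fold that truncates a running prefix-part list against each next key's parts, and the grouping loop uses setdefault instead of a membership test plus append.
import Mathlib
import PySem

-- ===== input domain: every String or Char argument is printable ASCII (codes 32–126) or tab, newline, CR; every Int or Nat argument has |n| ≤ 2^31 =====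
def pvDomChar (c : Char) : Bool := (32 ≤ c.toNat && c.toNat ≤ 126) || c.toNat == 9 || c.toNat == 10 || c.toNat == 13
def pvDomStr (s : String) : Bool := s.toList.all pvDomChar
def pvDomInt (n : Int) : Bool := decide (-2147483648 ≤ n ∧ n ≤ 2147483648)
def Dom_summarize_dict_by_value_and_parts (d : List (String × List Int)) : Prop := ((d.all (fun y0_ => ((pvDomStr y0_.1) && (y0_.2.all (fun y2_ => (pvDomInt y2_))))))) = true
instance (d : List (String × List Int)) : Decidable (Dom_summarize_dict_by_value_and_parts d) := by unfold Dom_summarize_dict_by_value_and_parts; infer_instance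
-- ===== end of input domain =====

-- B replaces A's columnar zip-transpose common-prefix scan by a left fold truncating a
-- running prefix-part list (objective: alternative, not faster); same results, including
-- the groups without a common prefix, whose '' entry gets the leftover `value` variable.

-- ===== PORT A =====

-- k.split(".") ; sep "." ≠ "" so split? is always `some`
def pvSplitDot (k : String) : List String := (PySem.Str.split? k ".").getD []

-- len(set(parts)) == 1
def pvAllSame (col : List String) : Bool := PySem.Set.len (PySem.Set.ofList col) == 1

-- the `for parts in zip(*key_parts): if …: common_length += 1 else: break` loop
def pvCommonLen : List (List String) → Nat
  | [] => 0
  | col :: rest => if pvAllSame col then pvCommonLen rest + 1 else 0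

-- min length over the lists (zip(*key_parts) stops at the shortest list)
def pvMinLen : List (List String) → Nat
  | [] => 0
  | [p] => p.length
  | p :: q :: rest => min p.length (pvMinLen (q :: rest))

-- zip(*key_parts), ported by hand: column i (as a list) for each i below the min length; exact here
def pvCols (pss : List (List String)) : List (List String) :=
  (List.range (pvMinLen pss)).map (fun i => pss.map (fun p => p.getD i ""))

def pvFindCommonPrefixA (keys : List String) : String :=
  match keys with
  | [] => ""
  | [k] => k
  | _ =>
    let key_parts := keys.map pvSplitDot
    let common_length := pvCommonLen (pvCols key_parts)
    if common_length = 0 then ""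
    else PySem.Str.join "." ((key_parts.headD []).take common_length)

def summarize_dict_by_value_and_parts (d : List (String × List Int)) : List (String × List Int) :=
  let items := (PySem.Dict.ofList d).items
  -- first loop: group keys by value; the loop variable `value` is carried as the
  -- second state component (the Python leaves it behind and reads it later)
  let st := items.foldl
    (fun (st : PySem.Dict (List Int) (List String) × List Int) kv =>
      let vtk := st.1
      -- value_tuple := tuple(value); values here are lists of ints, so it is the value itself
      let vtk := if vtk.contains kv.2 then vtk else vtk.insert kv.2 []
      (vtk.modify kv.2 [] (fun ks => ks ++ [kv.1]), kv.2))
    (PySem.Dict.empty, [])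
  let value_to_keys := st.1
  -- second loop: `value` continues from the first loop's leftover (st.2)
  let fin := value_to_keys.items.foldl
    (fun (st : PySem.Dict String (List Int) × List Int) g =>
      let pfx := pvFindCommonPrefixA g.2
      if pfx ≠ "" then
        -- value = list(value_tuple) (d[keys[0]] is a list here)
        (st.1.insert pfx g.1, g.1)
      else
        (st.1.insert "" st.2, st.2))
    (PySem.Dict.empty, st.2)
  fin.1.items

-- ===== PORT B =====

-- _lcp: walk the zipped pairs, stop at the first mismatch
def pvLcp : List String → List String → List String
  | x :: xs, y :: ys => if x = y then x :: pvLcp xs ys else []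
  | _, _ => []

def pvFindCommonPrefixB (keys : List String) : String :=
  match keys with
  | [] => ""   -- unreachable: every group holds at least one key
  | [k] => k
  | k :: ks => PySem.Str.join "." (ks.foldl (fun acc k' => pvLcp acc (pvSplitDot k')) (pvSplitDot k))

def summarize_dict_by_value_and_parts_alt (d : List (String × List Int)) : List (String × List Int) :=
  let items := (PySem.Dict.ofList d).items
  -- groups.setdefault(vt, []).append(key)
  let groups := items.foldl
    (fun (g : PySem.Dict (List Int) (List String)) kv => g.modify kv.2 [] (fun ks => ks ++ [kv.1]))
    PySem.Dict.empty
  -- the loop variable `value` as the grouping loop leaves it: the last item's value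
  -- (the placeholder [] is never read when d is empty, since there are no groups then)
  let value := ((items.getLast?).map (·.2)).getD []
  let fin := groups.items.foldl
    (fun (st : PySem.Dict String (List Int) × List Int) g =>
      let pfx := pvFindCommonPrefixB g.2
      if pfx ≠ "" then
        (st.1.insert pfx g.1, g.1)
      else
        (st.1.insert "" st.2, st.2))
    (PySem.Dict.empty, value)
  fin.1.items

-- ===== PRECONDITION & SPEC =====
def Spec_summarize_dict_by_value_and_parts (d : List (String × List Int)) (out : List (String × List Int)) : Prop := out = summarize_dict_by_value_and_parts_alt d
instance (d : List (String × List Int)) (out : List (String × List Int)) : Decidable (Spec_summarize_dict_by_value_and_parts d out) := by unfold Spec_summarize_dict_by_value_and_parts; infer_instance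

-- ===== CLAIM (what is proved, stated in full; the proofs are below) =====
def Claim_equal_summarize_dict_by_value_and_parts : Prop := ∀ (d : List (String × List Int)), Dom_summarize_dict_by_value_and_parts d → Spec_summarize_dict_by_value_and_parts d (summarize_dict_by_value_and_parts d)

-- ===== LEMMAS AND PROOFS =====
theorem dict_insert_insert_of_not_contains {κ ν : Type} [BEq κ] [LawfulBEq κ]
    (g : PySem.Dict κ ν) (v : κ) (w w' : ν) (h : g.contains v = false) :
    (g.insert v w).insert v w' = g.insert v w' := by
  apply PySem.Dict.ext
  rw [PySem.Dict.items_insert_of_contains _ _ (PySem.Dict.contains_insert_self _ _ _),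
      PySem.Dict.items_insert_of_not_contains _ _ h,
      PySem.Dict.items_insert_of_not_contains _ _ h, List.map_append]
  have hni : ∀ p ∈ g.items, ¬ (p.1 == v) = true := by
    intro p hp
    exact List.any_eq_false.mp h p hp
  congr 1
  · rw [List.map_congr_left (g := id) (by intro p hp; simp [hni p hp]), List.map_id]
  · simp

theorem setdefault_append_eq_modify {κ ν : Type} [BEq κ] [LawfulBEq κ]
    (g : PySem.Dict κ ν) (v : κ) (dflt : ν) (f : ν → ν) :
    (if g.contains v then g else g.insert v dflt).modify v dflt f = g.modify v dflt f := by
  by_cases h : g.contains v = true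
  · simp [h]
  · rw [Bool.not_eq_true] at h
    simp only [h, if_neg Bool.false_ne_true, PySem.Dict.modify,
      PySem.Dict.getD_insert_self, PySem.Dict.getD_of_not_contains _ _ h,
      dict_insert_insert_of_not_contains _ _ _ _ h]

theorem fold_pair_fst {α β σ : Type} (f : σ → α → σ) (p : α → β) (items : List α) (g : σ) (v0 : β) :
    (items.foldl (fun (st : σ × β) kv => (f st.1 kv, p kv)) (g, v0)).1 = items.foldl f g := by
  induction items generalizing g v0 with
  | nil => rfl
  | cons kv rest ih => exact ih _ _

theorem fold_pair_snd {α β σ : Type} (f : σ → α → σ) (p : α → β) (items : List α) (g : σ) (v0 : β) :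
    (items.foldl (fun (st : σ × β) kv => (f st.1 kv, p kv)) (g, v0)).2 =
      (items.getLast?.map p).getD v0 := by
  induction items generalizing g v0 with
  | nil => rfl
  | cons kv rest ih =>
    simp only [List.foldl_cons, ih]
    cases h : rest.getLast? with
    | none =>
      have : rest = [] := List.getLast?_eq_none_iff.mp h
      subst this; rfl
    | some x =>
      cases rest with
      | nil => simp at h
      | cons q t => simp [List.getLast?_cons_cons, h]

theorem group_fold_eq (items : List (String × List Int))
    (g : PySem.Dict (List Int) (List String)) (v0 : List Int) :
    (items.foldl
      (fun (st : PySem.Dict (List Int) (List String) × List Int) kv =>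
        ((if st.1.contains kv.2 then st.1 else st.1.insert kv.2 []).modify kv.2 []
          (fun ks => ks ++ [kv.1]), kv.2)) (g, v0)).1 =
    items.foldl
      (fun (g : PySem.Dict (List Int) (List String)) kv => g.modify kv.2 [] (fun ks => ks ++ [kv.1])) g := by
  have hstep : (fun (st : PySem.Dict (List Int) (List String) × List Int) (kv : String × List Int) =>
        ((if st.1.contains kv.2 then st.1 else st.1.insert kv.2 []).modify kv.2 []
          (fun ks => ks ++ [kv.1]), kv.2)) =
      (fun st kv => ((fun (g : PySem.Dict (List Int) (List String)) (kv : String × List Int) =>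
        g.modify kv.2 [] (fun ks => ks ++ [kv.1])) st.1 kv, (fun (kv : String × List Int) => kv.2) kv)) := by
    funext st kv
    rw [setdefault_append_eq_modify]
  rw [hstep]
  exact fold_pair_fst (fun g kv => g.modify kv.2 [] fun ks => ks ++ [kv.1]) (fun kv => kv.2) items g v0

theorem stale_fold_eq (items : List (String × List Int))
    (g : PySem.Dict (List Int) (List String)) (v0 : List Int) :
    (items.foldl
      (fun (st : PySem.Dict (List Int) (List String) × List Int) kv =>
        ((if st.1.contains kv.2 then st.1 else st.1.insert kv.2 []).modify kv.2 []
          (fun ks => ks ++ [kv.1]), kv.2)) (g, v0)).2 =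
    ((items.getLast?).map (·.2)).getD v0 := by
  have hstep : (fun (st : PySem.Dict (List Int) (List String) × List Int) (kv : String × List Int) =>
        ((if st.1.contains kv.2 then st.1 else st.1.insert kv.2 []).modify kv.2 []
          (fun ks => ks ++ [kv.1]), kv.2)) =
      (fun st kv => ((fun (g : PySem.Dict (List Int) (List String)) (kv : String × List Int) =>
        g.modify kv.2 [] (fun ks => ks ++ [kv.1])) st.1 kv, (fun (kv : String × List Int) => kv.2) kv)) := by
    funext st kv
    rw [setdefault_append_eq_modify]
  rw [hstep]
  exact fold_pair_snd (fun g kv => g.modify kv.2 [] fun ks => ks ++ [kv.1]) (fun kv => kv.2) items g v0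

theorem pvLcp_prefix_left (a b : List String) : pvLcp a b <+: a := by
  induction a generalizing b with
  | nil => cases b <;> simp [pvLcp]
  | cons x xs ih =>
    cases b with
    | nil => simp [pvLcp]
    | cons y ys =>
      by_cases h : x = y
      · simpa [pvLcp, h] using ih ys
      · simp [pvLcp, h]

theorem pvLcp_prefix_right (a b : List String) : pvLcp a b <+: b := by
  induction a generalizing b with
  | nil => cases b <;> simp [pvLcp]
  | cons x xs ih =>
    cases b with
    | nil => simp [pvLcp]
    | cons y ys =>
      by_cases h : x = y
      · subst h; simpa [pvLcp] using ih ys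
      · simp [pvLcp, h]

theorem prefix_pvLcp {y a b : List String} (ha : y <+: a) (hb : y <+: b) : y <+: pvLcp a b := by
  induction y generalizing a b with
  | nil => simp
  | cons z zs ih =>
    obtain ⟨ta, rfl⟩ := ha
    obtain ⟨tb, hb'⟩ := hb
    cases b with
    | nil => have := congrArg List.length hb'; simp at this
    | cons w ws =>
      rw [List.cons_append] at hb'
      injection hb' with h1 hb2
      subst h1
      simp only [List.cons_append, pvLcp, if_pos]
      exact List.cons_prefix_cons.mpr ⟨rfl, ih (List.prefix_append _ _) ⟨tb, hb2⟩⟩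

theorem foldl_lcp_prefix_start (t : List (List String)) (x : List String) :
    t.foldl pvLcp x <+: x := by
  induction t generalizing x with
  | nil => simp
  | cons r t ih => exact (ih (pvLcp x r)).trans (pvLcp_prefix_left x r)

theorem foldl_lcp_prefix_mem (t : List (List String)) (x : List String) (q : List String)
    (hq : q ∈ t) : t.foldl pvLcp x <+: q := by
  induction t generalizing x with
  | nil => simp at hq
  | cons r t ih =>
    simp only [List.foldl_cons]
    rcases List.mem_cons.mp hq with rfl | hq'
    · exact (foldl_lcp_prefix_start t (pvLcp x q)).trans (pvLcp_prefix_right x q)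
    · exact ih (pvLcp x r) hq'

theorem foldl_lcp_common (rest : List (List String)) (ps : List String) (q : List String)
    (hq : q ∈ ps :: rest) :
    rest.foldl pvLcp ps <+: q := by
  rcases List.mem_cons.mp hq with rfl | hq'
  · exact foldl_lcp_prefix_start rest q
  · exact foldl_lcp_prefix_mem rest ps q hq'

theorem foldl_lcp_max (rest : List (List String)) (ps : List String) (y : List String)
    (hy : ∀ q ∈ ps :: rest, y <+: q) :
    y <+: rest.foldl pvLcp ps := by
  induction rest generalizing ps with
  | nil => exact hy ps (by simp)
  | cons r t ih =>
    simp only [List.foldl_cons]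
    refine ih (pvLcp ps r) ?_
    intro q hq
    rcases List.mem_cons.mp hq with rfl | hq'
    · exact prefix_pvLcp (hy ps (by simp)) (hy r (by simp))
    · exact hy q (by simp [hq'])

theorem pvAllSame_cons_iff (x : String) (xs : List String) :
    pvAllSame (x :: xs) = true ↔ ∀ y ∈ xs, y = x := by
  constructor
  · intro h
    have hlen : (PySem.Set.ofList (x :: xs)).length = 1 := by
      have := of_decide_eq_true (by simpa [pvAllSame, PySem.Set.len, beq_iff_eq] using h)
      omega
    obtain ⟨a, ha⟩ := List.length_eq_one_iff.mp hlen
    intro y hy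
    have h1 : y ∈ PySem.Set.ofList (x :: xs) := (PySem.Set.mem_ofList _ _).mpr (by simp [hy])
    have h2 : x ∈ PySem.Set.ofList (x :: xs) := (PySem.Set.mem_ofList _ _).mpr (by simp)
    rw [ha] at h1 h2
    simp at h1 h2
    rw [h1, h2]
  · intro h
    have hmem : ∀ y ∈ PySem.Set.ofList (x :: xs), y = x := by
      intro y hy
      rcases List.mem_cons.mp ((PySem.Set.mem_ofList _ _).mp hy) with rfl | hy'
      · rfl
      · exact h y hy'
    have hx : x ∈ PySem.Set.ofList (x :: xs) := (PySem.Set.mem_ofList _ _).mpr (by simp)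
    have hnd : (PySem.Set.ofList (x :: xs)).Nodup := PySem.Set.nodup_ofList _
    have hone : (PySem.Set.ofList (x :: xs)).length = 1 := by
      rcases hL : PySem.Set.ofList (x :: xs) with _ | ⟨a, _ | ⟨b, t⟩⟩
      · rw [hL] at hx; simp at hx
      · rfl
      · exfalso
        rw [hL] at hmem hnd
        have ha : a = x := hmem a (by simp)
        have hb : b = x := hmem b (by simp)
        simp [ha, hb] at hnd
    simp [pvAllSame, PySem.Set.len, hone]

theorem pvCommonLen_le (l : List (List String)) : pvCommonLen l ≤ l.length := by
  induction l with
  | nil => simp [pvCommonLen]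
  | cons c r ih =>
    by_cases h : pvAllSame c
    · simp [pvCommonLen, h]; omega
    · simp [pvCommonLen, h]

theorem pvCommonLen_sat (l : List (List String)) (i : Nat) (hi : i < pvCommonLen l)
    (hl : i < l.length) : pvAllSame l[i] = true := by
  induction l generalizing i with
  | nil => simp at hl
  | cons c r ih =>
    by_cases h : pvAllSame c = true
    · cases i with
      | zero => simpa using h
      | succ j =>
        simp only [pvCommonLen, if_pos h] at hi
        exact ih j (by omega) (by simpa using Nat.lt_of_succ_lt_succ hl)
    · rw [Bool.not_eq_true] at h
      simp [pvCommonLen, h] at hi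

theorem pvCommonLen_stop (l : List (List String)) (h : pvCommonLen l < l.length) :
    pvAllSame l[pvCommonLen l] = false := by
  induction l with
  | nil => simp at h
  | cons c r ih =>
    by_cases hc : pvAllSame c = true
    · simp only [pvCommonLen, if_pos hc] at h ⊢
      simpa using ih (by simpa using Nat.lt_of_succ_lt_succ h)
    · rw [Bool.not_eq_true] at hc
      simp [pvCommonLen, hc]

theorem pvMinLen_le {pss : List (List String)} {q : List String} (h : q ∈ pss) :
    pvMinLen pss ≤ q.length := by
  induction pss with
  | nil => simp at h
  | cons p rest ih =>
    cases rest with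
    | nil => simp at h; subst h; simp [pvMinLen]
    | cons a b =>
      rcases List.mem_cons.mp h with rfl | h'
      · simp [pvMinLen]
      · exact le_trans (by simp [pvMinLen]) (ih h')

theorem le_pvMinLen {pss : List (List String)} {n : Nat} (hne : pss ≠ [])
    (h : ∀ q ∈ pss, n ≤ q.length) : n ≤ pvMinLen pss := by
  induction pss with
  | nil => simp at hne
  | cons p rest ih =>
    cases rest with
    | nil => simpa [pvMinLen] using h p (by simp)
    | cons a b =>
      have h1 := h p (by simp)
      have h2 := ih (by simp) (fun q hq => h q (by simp [hq]))
      simp [pvMinLen]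
      omega

theorem cols_length (pss : List (List String)) : (pvCols pss).length = pvMinLen pss := by
  simp [pvCols]

theorem cols_getElem (pss : List (List String)) (i : Nat) (hi : i < (pvCols pss).length) :
    (pvCols pss)[i] = pss.map (fun p => p.getD i "") := by
  simp [pvCols]

theorem col_allSame_iff (ps : List String) (rest : List (List String)) (i : Nat) :
    pvAllSame ((ps :: rest).map (fun p => p.getD i "")) = true ↔
      ∀ q ∈ rest, q.getD i "" = ps.getD i "" := by
  rw [List.map_cons, pvAllSame_cons_iff]
  constructor
  · intro h q hq
    exact h _ (List.mem_map_of_mem hq)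
  · intro h y hy
    obtain ⟨q, hq, rfl⟩ := List.mem_map.mp hy
    exact h q hq

theorem takeA_common (ps : List String) (rest : List (List String)) (q : List String)
    (hq : q ∈ ps :: rest) :
    ps.take (pvCommonLen (pvCols (ps :: rest))) <+: q := by
  set c := pvCommonLen (pvCols (ps :: rest)) with hc
  have hcmin : c ≤ pvMinLen (ps :: rest) := by
    rw [hc, ← cols_length]; exact pvCommonLen_le _
  have hcq : c ≤ q.length := le_trans hcmin (pvMinLen_le hq)
  have hcps : c ≤ ps.length := le_trans hcmin (pvMinLen_le (by simp))
  have heq : q.take c = ps.take c := by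
    apply List.ext_getElem
    · simp; omega
    · intro i h1 h2
      have hic : i < c := by simp at h1; omega
      have hiq : i < q.length := lt_of_lt_of_le hic hcq
      have hips : i < ps.length := lt_of_lt_of_le hic hcps
      have hicols : i < (pvCols (ps :: rest)).length := by
        rw [cols_length]; exact lt_of_lt_of_le hic hcmin
      have hcol := pvCommonLen_sat (pvCols (ps :: rest)) i hic hicols
      rw [cols_getElem _ _ hicols] at hcol
      have hall := (col_allSame_iff ps rest i).mp hcol
      simp only [List.getElem_take]
      rcases List.mem_cons.mp hq with rfl | hq'
      · rfl
      · have hgd := hall q hq'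
        rwa [List.getD_eq_getElem _ _ hiq, List.getD_eq_getElem _ _ hips] at hgd
  calc ps.take c = q.take c := heq.symm
    _ <+: q := List.take_prefix _ _

theorem takeA_max (ps : List String) (rest : List (List String)) (y : List String)
    (hy : ∀ q ∈ ps :: rest, y <+: q) :
    y <+: ps.take (pvCommonLen (pvCols (ps :: rest))) := by
  set c := pvCommonLen (pvCols (ps :: rest)) with hc
  rw [List.prefix_take_iff]
  refine ⟨hy ps (by simp), ?_⟩
  by_contra hlen
  rw [not_le] at hlen
  have hymin : y.length ≤ pvMinLen (ps :: rest) :=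
    le_pvMinLen (by simp) (fun q hq => (hy q hq).length_le)
  have hccols : c < (pvCols (ps :: rest)).length := by
    rw [cols_length]; exact lt_of_lt_of_le hlen hymin
  have hstop := pvCommonLen_stop (pvCols (ps :: rest)) hccols
  rw [cols_getElem _ _ hccols] at hstop
  have : pvAllSame ((ps :: rest).map (fun p => p.getD c "")) = true := by
    rw [col_allSame_iff]
    intro q hq
    have h1 : q.getD c "" = y[c]'hlen := by
      have hpq := hy q (by simp [hq])
      rw [List.getD_eq_getElem _ _ (lt_of_lt_of_le hlen hpq.length_le)]
      exact (hpq.getElem hlen).symm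
    have h2 : ps.getD c "" = y[c]'hlen := by
      have hpq := hy ps (by simp)
      rw [List.getD_eq_getElem _ _ (lt_of_lt_of_le hlen hpq.length_le)]
      exact (hpq.getElem hlen).symm
    rw [h1, h2]
  rw [this] at hstop
  simp at hstop

theorem core_eq (ps : List String) (rest : List (List String)) :
    rest.foldl pvLcp ps = ps.take (pvCommonLen (pvCols (ps :: rest))) := by
  have h1 : rest.foldl pvLcp ps <+: ps.take (pvCommonLen (pvCols (ps :: rest))) :=
    takeA_max ps rest _ (fun q hq => foldl_lcp_common rest ps q hq)
  have h2 : ps.take (pvCommonLen (pvCols (ps :: rest))) <+: rest.foldl pvLcp ps :=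
    foldl_lcp_max rest ps _ (fun q hq => takeA_common ps rest q hq)
  exact h1.eq_of_length (le_antisymm h1.length_le h2.length_le)

theorem fcp_eq (keys : List String) : pvFindCommonPrefixA keys = pvFindCommonPrefixB keys := by
  match keys with
  | [] => rfl
  | [k] => rfl
  | k1 :: k2 :: ks =>
    simp only [pvFindCommonPrefixA, pvFindCommonPrefixB]
    rw [← List.foldl_map (f := pvSplitDot) (g := pvLcp), List.map_cons, core_eq]
    simp only [List.map_cons, List.headD_cons]
    by_cases hc : pvCommonLen (pvCols (pvSplitDot k1 :: pvSplitDot k2 :: ks.map pvSplitDot)) = 0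
    · rw [if_pos hc, hc, List.take_zero]
      rfl
    · rw [if_neg hc]

-- ===== VERDICT (by name: the statement is the Claim_ definition above) =====
theorem summarize_dict_by_value_and_parts_spec : Claim_equal_summarize_dict_by_value_and_parts := by
  intro d _
  unfold Spec_summarize_dict_by_value_and_parts
  unfold summarize_dict_by_value_and_parts summarize_dict_by_value_and_parts_alt
  simp only [group_fold_eq, stale_fold_eq, fcp_eq]
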